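-- pv_equiv track=rewrite | github.com/Rjrtgarcia/ConsultEasev3 | central_system/ui/admin_panels/faculty_manager.py | _validate_ble_id
-- ===== SOURCE A (Python) =====
-- def _validate_ble_id(ble_id):
--     """
--     Validate BLE Beacon ID format.
--
--     Args:
--         ble_id (str): BLE Beacon ID
--
--     Returns:
--         bool: True if valid, False otherwise
--     """
--     # Simple format check (could be more sophisticated)
--     parts = ble_id.split(':')
--     if len(parts) != 6:
--         return False
--
--     for part in parts:
--         if len(part) != 2 or not all(c in '0123456789ABCDEFabcdef' for c in part):
--             return False
--
--     return True
-- ===== SOURCE B (Python) =====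
-- HEX_DIGITS = set('0123456789ABCDEFabcdef')
--
-- def _validate_ble_id(ble_id):
--     # Single positional scan: length must be 17, every third char a ':',
--     # all others hex digits.  No split, no per-part loop.
--     if len(ble_id) != 17:
--         return False
--     for i, c in enumerate(ble_id):
--         if i % 3 == 2:
--             if c != ':':
--                 return False
--         elif c not in HEX_DIGITS:
--             return False
--     return True
-- ===== Notes on version B (the rewrite author's own statement) =====
-- stated objective: simpler
-- what changed: A splits the string on the colon separator into parts and scans each part with a nested membership loop; B does one positional pass over the whole string (length must be 17, every index i with i % 3 == 2 holds a colon, all other positions hold hex digits), with no split and no per-part loop.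
import Mathlib
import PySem

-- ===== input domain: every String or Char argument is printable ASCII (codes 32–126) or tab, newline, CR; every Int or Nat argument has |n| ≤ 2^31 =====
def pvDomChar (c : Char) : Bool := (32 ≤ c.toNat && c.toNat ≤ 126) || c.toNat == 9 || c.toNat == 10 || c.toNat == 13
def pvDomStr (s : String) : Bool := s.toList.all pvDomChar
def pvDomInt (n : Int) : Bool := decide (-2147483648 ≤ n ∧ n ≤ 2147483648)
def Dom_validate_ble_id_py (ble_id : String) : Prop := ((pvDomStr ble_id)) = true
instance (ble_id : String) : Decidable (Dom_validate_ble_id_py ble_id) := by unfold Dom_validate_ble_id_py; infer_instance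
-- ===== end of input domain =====

-- B replaces A's split-into-6-parts-then-scan-each-part with a single positional pass
-- (length 17, char at index i must be ':' iff i % 3 == 2, hex otherwise); objective: simpler.

-- ===== PORT A =====
def validate_ble_id_py (ble_id : String) : Bool :=
  let parts := PySem.Chars.splitOn ble_id.toList [':']
  if parts.length ≠ 6 then false
  else parts.all (fun part =>
    !(decide (part.length ≠ 2) ||
      !(part.all (fun c => PySem.Chars.isIn [c] "0123456789ABCDEFabcdef".toList))))

-- ===== PORT B =====
def pvHexDigits : PySem.Set Char := PySem.Set.ofList "0123456789ABCDEFabcdef".toList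

def validate_ble_id_py_alt (ble_id : String) : Bool :=
  let cs := ble_id.toList
  if cs.length ≠ 17 then false
  else (PySem.List.enumerate cs).all (fun ic =>
    if PySem.Int.mod ic.1 3 == 2 then ic.2 == ':' else pvHexDigits.contains ic.2)

-- ===== PRECONDITION & SPEC =====
def Spec_validate_ble_id_py (ble_id : String) (out : Bool) : Prop := out = validate_ble_id_py_alt ble_id
instance (ble_id : String) (out : Bool) : Decidable (Spec_validate_ble_id_py ble_id out) := by unfold Spec_validate_ble_id_py; infer_instance

-- ===== CLAIM (what is proved, stated in full; the proofs are below) =====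
def Claim_equal_validate_ble_id_py : Prop := ∀ (ble_id : String), Dom_validate_ble_id_py ble_id → Spec_validate_ble_id_py ble_id (validate_ble_id_py ble_id)

-- ===== LEMMAS AND PROOFS =====

-- the hex-digit alphabet, as a list of chars (proof-side only)
def pvHexL : List Char := "0123456789ABCDEFabcdef".toList

-- structural characterization of Python's s.split(':')
def splitC : List Char → List (List Char)
  | [] => [[]]
  | c :: rest =>
    if c = ':' then [] :: splitC rest
    else match splitC rest with
      | [] => [[c]]
      | p :: ps => (c :: p) :: ps

theorem splitC_ne_nil (cs : List Char) : splitC cs ≠ [] := by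
  induction cs with
  | nil => simp [splitC]
  | cons c rest ih =>
    simp only [splitC]
    split
    · simp
    · cases h : splitC rest <;> simp

theorem splitOn_go_eq (fuel : Nat) (l cur : List Char) (acc : List (List Char))
    (hf : l.length < fuel) :
    PySem.Chars.splitOn.go [':'] fuel l cur acc
      = acc.reverse ++ (match splitC l with
          | [] => []
          | p :: ps => (cur.reverse ++ p) :: ps) := by
  induction fuel generalizing l cur acc with
  | zero => omega
  | succ f ih =>
    cases l with
    | nil => simp [PySem.Chars.splitOn.go, splitC]
    | cons c rest =>
      rw [PySem.Chars.splitOn.go]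
      by_cases hc : c = ':'
      · subst hc
        have hpre : List.isPrefixOf [':'] (':' :: rest) = true := by simp [List.isPrefixOf]
        rw [if_pos hpre]
        rw [ih _ _ _ (by simpa using Nat.lt_of_succ_lt_succ hf)]
        obtain ⟨p, ps, hps⟩ : ∃ p ps, splitC rest = p :: ps := by
          cases h : splitC rest with
          | nil => exact absurd h (splitC_ne_nil rest)
          | cons p ps => exact ⟨p, ps, rfl⟩
        simp [splitC, hps]
      · have hpre : List.isPrefixOf [':'] (c :: rest) = false := by
          simp [List.isPrefixOf]; exact fun h => hc h.symm
        rw [if_neg (by simp [hpre])]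
        rw [ih _ _ _ (by simpa using Nat.lt_of_succ_lt_succ hf)]
        obtain ⟨p, ps, hps⟩ : ∃ p ps, splitC rest = p :: ps := by
          cases h : splitC rest with
          | nil => exact absurd h (splitC_ne_nil rest)
          | cons p ps => exact ⟨p, ps, rfl⟩
        simp [splitC, hc, hps]

theorem splitOn_colon (cs : List Char) :
    PySem.Chars.splitOn cs [':'] = splitC cs := by
  rw [PySem.Chars.splitOn, splitOn_go_eq _ _ _ _ (by omega)]
  obtain ⟨p, ps, hps⟩ : ∃ p ps, splitC cs = p :: ps := by
    cases h : splitC cs with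
    | nil => exact absurd h (splitC_ne_nil cs)
    | cons p ps => exact ⟨p, ps, rfl⟩
  simp [hps]

-- inversion of splitC
theorem splitC_inv (cs p : List Char) (ps : List (List Char)) (h : splitC cs = p :: ps) :
    (ps = [] ∧ cs = p) ∨ (∃ r, cs = p ++ ':' :: r ∧ splitC r = ps) := by
  induction cs generalizing p ps with
  | nil =>
    simp only [splitC, List.cons.injEq] at h
    exact Or.inl ⟨h.2.symm, h.1⟩
  | cons c rest ih =>
    cases hrest : splitC rest with
    | nil => exact absurd hrest (splitC_ne_nil rest)
    | cons q qs =>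
      by_cases hc : c = ':'
      · subst hc
        have h' : ([] : List Char) :: splitC rest = p :: ps := by simpa [splitC] using h
        injection h' with h1 h2
        exact Or.inr ⟨rest, by simp [← h1], h2⟩
      · have h' : (c :: q) :: qs = p :: ps := by simpa [splitC, hc, hrest] using h
        injection h' with h1 h2
        subst h1; subst h2
        rcases ih q qs hrest with ⟨rfl, rfl⟩ | ⟨r, rfl, rfl⟩
        · exact Or.inl ⟨rfl, rfl⟩
        · exact Or.inr ⟨r, rfl, rfl⟩

-- A's predicate, in structural form
def AgoodP (cs : List Char) (n : Nat) : Prop :=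
  (splitC cs).length = n ∧ ∀ p ∈ splitC cs, p.length = 2 ∧ ∀ c ∈ p, c ∈ pvHexL

-- B's predicate, in ∀-index form
def PosOK (cs : List Char) : Prop :=
  ∀ (i : Nat) (h : i < cs.length),
    if i % 3 = 2 then cs[i] = ':' else cs[i] ∈ pvHexL

theorem hex_ne_colon {c : Char} (h : c ∈ pvHexL) : c ≠ ':' := by
  intro hc; subst hc; revert h; decide

-- the heart: n+1 colon-separated good parts ⟺ length 3n+2 with the positional pattern
theorem Agood_iff_pos (n : Nat) : ∀ cs : List Char,
    AgoodP cs (n + 1) ↔ (cs.length = 3 * n + 2 ∧ PosOK cs) := by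
  induction n with
  | zero =>
    intro cs
    constructor
    · rintro ⟨hlen, hgood⟩
      obtain ⟨p, hps⟩ : ∃ p, splitC cs = [p] := by
        cases h : splitC cs with
        | nil => exact absurd h (splitC_ne_nil cs)
        | cons p ps =>
          rw [h] at hlen
          have : ps = [] := by simpa using hlen
          subst this
          exact ⟨p, rfl⟩
      rcases splitC_inv cs p [] hps with ⟨_, rfl⟩ | ⟨r, _, hr⟩
      · obtain ⟨hp2, hph⟩ := hgood cs (by simp [hps])
        obtain ⟨a, b, rfl⟩ : ∃ a b, cs = [a, b] := by
          match cs, hp2 with | [a, b], _ => exact ⟨a, b, rfl⟩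
        refine ⟨by simp, ?_⟩
        intro i hi
        have hi2 : i < 2 := by simpa using hi
        interval_cases i
        · simpa using hph a (by simp)
        · simpa using hph b (by simp)
      · exact absurd hr (splitC_ne_nil r)
    · rintro ⟨hlen, hpos⟩
      obtain ⟨a, b, rfl⟩ : ∃ a b, cs = [a, b] := by
        match cs, hlen with | [a, b], _ => exact ⟨a, b, rfl⟩
      · have ha : a ∈ pvHexL := by have := hpos 0 (by simp); simpa using this
        have hb : b ∈ pvHexL := by have := hpos 1 (by simp); simpa using this
        have hs : splitC [a, b] = [[a, b]] := by
          simp [splitC, hex_ne_colon ha, hex_ne_colon hb]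
        refine ⟨by simp [hs], ?_⟩
        intro p hp
        rw [hs] at hp; simp at hp; subst hp
        exact ⟨rfl, by intro c hc; simp at hc; rcases hc with rfl | rfl <;> assumption⟩
  | succ n ih =>
    intro cs
    constructor
    · rintro ⟨hlen, hgood⟩
      obtain ⟨p, ps, hps⟩ : ∃ p ps, splitC cs = p :: ps := by
        cases h : splitC cs with
        | nil => exact absurd h (splitC_ne_nil cs)
        | cons p ps => exact ⟨p, ps, rfl⟩
      have hpslen : ps.length = n + 1 := by rw [hps] at hlen; simpa using hlen
      rcases splitC_inv cs p ps hps with ⟨hnil, _⟩ | ⟨r, rfl, hr⟩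
      · rw [hnil] at hpslen; simp at hpslen
      · obtain ⟨hp2, hph⟩ := hgood p (by simp [hps])
        have hrgood : AgoodP r (n + 1) := by
          refine ⟨by rw [hr, hpslen], ?_⟩
          intro q hq
          exact hgood q (by rw [hps]; exact List.mem_cons_of_mem _ (hr ▸ hq))
        obtain ⟨hrlen, hrpos⟩ := (ih r).mp hrgood
        obtain ⟨a, b, rfl⟩ : ∃ a b, p = [a, b] := by
          match p, hp2 with | [a, b], _ => exact ⟨a, b, rfl⟩
        · have ha : a ∈ pvHexL := hph a (by simp)
          have hb : b ∈ pvHexL := hph b (by simp)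
          constructor
          · simp [hrlen]; ring
          · intro i hi
            match i with
            | 0 => simpa using ha
            | 1 => simpa using hb
            | 2 => simp
            | (j + 3) =>
              have hj : j < r.length := by simp at hi; omega
              have := hrpos j hj
              have hmod : (j + 3) % 3 = j % 3 := by omega
              simpa [hmod, List.getElem_cons_succ] using this
    · rintro ⟨hlen, hpos⟩
      obtain ⟨a, b, c2, r, rfl⟩ : ∃ a b c r', cs = a :: b :: c :: r' := by
        match cs, (by omega : cs.length = 3 * n + 5 → 3 ≤ cs.length) hlen with
        | a :: b :: c :: r', _ => exact ⟨a, b, c, r', rfl⟩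
      · have ha : a ∈ pvHexL := by have := hpos 0 (by simp); simpa using this
        have hb : b ∈ pvHexL := by have := hpos 1 (by simp); simpa using this
        have hc2 : c2 = ':' := by have := hpos 2 (by simp); simpa using this
        subst hc2
        have hrlen : r.length = 3 * n + 2 := by simp at hlen; omega
        have hrpos : PosOK r := by
          intro j hj
          have := hpos (j + 3) (by simp; omega)
          have hmod : (j + 3) % 3 = j % 3 := by omega
          simpa [hmod, List.getElem_cons_succ] using this
        obtain ⟨hslen, hsgood⟩ := (ih r).mpr ⟨hrlen, hrpos⟩
        have hs : splitC (a :: b :: ':' :: r) = [a, b] :: splitC r := by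
          simp [splitC, hex_ne_colon ha, hex_ne_colon hb]
        refine ⟨by simp [hs, hslen], ?_⟩
        intro p hp
        rw [hs] at hp
        rcases List.mem_cons.mp hp with rfl | hp
        · exact ⟨rfl, by intro c hc; simp at hc; rcases hc with rfl | rfl <;> assumption⟩
        · exact hsgood p hp

theorem pvHexA_iff (c : Char) :
    PySem.Chars.isIn [c] "0123456789ABCDEFabcdef".toList = true ↔ c ∈ pvHexL := by
  rw [PySem.Chars.isIn_iff_infix]
  exact (List.singleton_infix_iff c _)

theorem A_iff (s : String) : validate_ble_id_py s = true ↔ AgoodP s.toList 6 := by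
  unfold validate_ble_id_py AgoodP
  rw [splitOn_colon]
  by_cases h : (splitC s.toList).length = 6
  · rw [if_neg (by simp [h])]
    rw [List.all_eq_true]
    constructor
    · intro hall
      refine ⟨h, fun p hp => ?_⟩
      have := hall p hp
      simp only [Bool.not_eq_eq_eq_not, Bool.not_true, Bool.or_eq_false_iff,
        decide_eq_false_iff_not, not_not] at this
      refine ⟨this.1, fun c hc => ?_⟩
      exact (pvHexA_iff c).mp (by have := List.all_eq_true.mp this.2 c hc; simpa using this)
    · rintro ⟨_, hgood⟩ p hp
      obtain ⟨hp2, hph⟩ := hgood p hp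
      simp only [Bool.not_eq_eq_eq_not, Bool.not_true, Bool.or_eq_false_iff,
        decide_eq_false_iff_not, not_not]
      exact ⟨hp2, List.all_eq_true.mpr fun c hc => by simpa using (pvHexA_iff c).mpr (hph c hc)⟩
  · rw [if_pos (by simp [h])]
    constructor
    · intro hf; simp at hf
    · rintro ⟨h6, _⟩; exact absurd h6 h

theorem B_iff (s : String) :
    validate_ble_id_py_alt s = true ↔ (s.toList.length = 17 ∧ PosOK s.toList) := by
  unfold validate_ble_id_py_alt
  by_cases h : s.toList.length = 17
  · rw [if_neg (not_not_intro h)]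
    rw [List.all_eq_true]
    constructor
    · intro hall
      refine ⟨h, fun i hi => ?_⟩
      have hm : (((i : Nat) : Int), s.toList[i]) ∈ PySem.List.enumerate s.toList 0 := by
        rw [PySem.List.mem_enumerate_iff]
        exact ⟨i, hi, by simp⟩
      have := hall _ hm
      simp only at this
      rw [show (3 : Int) = ((3 : Nat) : Int) from rfl, PySem.Int.mod_natCast] at this
      by_cases hmod : i % 3 = 2
      · rw [if_pos hmod]
        rw [if_pos (by simp [hmod])] at this
        simpa using this
      · rw [if_neg hmod]
        rw [if_neg (by simpa using fun hc => hmod (by exact_mod_cast hc))] at this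
        have : s.toList[i] ∈ pvHexDigits := by
          simpa [PySem.Set.contains_iff] using this
        simpa [pvHexDigits, PySem.Set.mem_ofList, pvHexL] using this
    · rintro ⟨_, hpos⟩ ic hic
      rw [PySem.List.mem_enumerate_iff] at hic
      obtain ⟨k, hk, rfl⟩ := hic
      have := hpos k hk
      simp only [zero_add]
      rw [show (3 : Int) = ((3 : Nat) : Int) from rfl, PySem.Int.mod_natCast]
      by_cases hmod : k % 3 = 2
      · rw [if_pos (by simp [hmod])]
        rw [if_pos hmod] at this
        simp [this]
      · rw [if_neg (by simpa using fun hc => hmod (by exact_mod_cast hc))]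
        rw [if_neg hmod] at this
        rw [show pvHexDigits.contains s.toList[k] = true ↔ s.toList[k] ∈ pvHexDigits from PySem.Set.contains_iff _ _]
        rw [pvHexDigits, PySem.Set.mem_ofList]
        simpa [pvHexL] using this
  · rw [if_pos h]
    constructor
    · intro hf; simp at hf
    · rintro ⟨h17, _⟩; exact absurd h17 h

-- ===== VERDICT (by name: the statement is the Claim_ definition above) =====
theorem validate_ble_id_py_spec : Claim_equal_validate_ble_id_py := by
  intro s _
  unfold Spec_validate_ble_id_py
  rw [Bool.eq_iff_iff, A_iff, B_iff]
  have := Agood_iff_pos 5 s.toList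
  simpa using this
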